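-- pv_equiv track=rewrite | github.com/PavelTishkin/adventofcode2020-python | day16/main.py | get_invalid_fields
-- ===== SOURCE A (Python) =====
-- def get_invalid_fields(rules, ticket):
--     invalid_fields = []
--     for field in ticket:
--         is_valid_field = False
--         for rule in rules.values():
--             if field in rule:
--                 is_valid_field = True
--                 break
--         if not is_valid_field:
--             invalid_fields.append(field)
--     return invalid_fields
-- ===== SOURCE B (Python) =====
-- def get_invalid_fields(rules, ticket):
--     valid = set().union(*rules.values())
--     return [f for f in ticket if f not in valid]
-- ===== Notes on version B (the rewrite author's own statement) =====
-- stated objective: faster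
-- what changed: Replaces the per-field nested scan over rules with one merged membership set built once from all rule values, then a single filtering pass over the ticket.
import Mathlib
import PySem

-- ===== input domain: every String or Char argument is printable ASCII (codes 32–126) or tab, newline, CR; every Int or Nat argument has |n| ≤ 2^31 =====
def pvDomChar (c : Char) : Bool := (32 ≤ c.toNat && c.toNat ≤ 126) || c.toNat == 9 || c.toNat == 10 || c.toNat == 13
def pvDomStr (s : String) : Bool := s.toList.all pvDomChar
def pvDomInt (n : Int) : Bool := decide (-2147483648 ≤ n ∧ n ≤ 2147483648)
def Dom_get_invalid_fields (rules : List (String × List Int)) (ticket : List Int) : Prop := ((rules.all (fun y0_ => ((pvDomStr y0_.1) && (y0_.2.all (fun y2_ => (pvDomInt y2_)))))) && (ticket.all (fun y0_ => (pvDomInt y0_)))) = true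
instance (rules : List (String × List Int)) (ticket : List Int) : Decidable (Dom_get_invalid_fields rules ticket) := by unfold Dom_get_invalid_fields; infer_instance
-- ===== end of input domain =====

-- B builds one merged set of all rule values once and filters the ticket in a single pass,
-- instead of A's nested scan over all rules for every field (objective: simpler).

-- ===== PORT A =====
-- inner 'for rule in rules.values(): if field in rule: is_valid_field = True; break'
def pvAnyRule (field : Int) : List (List Int) → Bool
  | [] => false
  | rule :: rest => if rule.contains field then true else pvAnyRule field rest

def get_invalid_fields (rules : List (String × List Int)) (ticket : List Int) : List Int :=
  ticket.foldl (fun invalid_fields field =>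
    if pvAnyRule field (rules.map Prod.snd) then invalid_fields
    else invalid_fields ++ [field]) []

-- ===== PORT B =====
def get_invalid_fields_alt (rules : List (String × List Int)) (ticket : List Int) : List Int :=
  let valid : PySem.Set Int := rules.foldl (fun s r => PySem.Set.union s r.2) PySem.Set.empty
  ticket.filter (fun f => !(PySem.Set.contains valid f))

-- ===== PRECONDITION & SPEC =====
def Spec_get_invalid_fields (rules : List (String × List Int)) (ticket : List Int) (out : List Int) : Prop := out = get_invalid_fields_alt rules ticket
instance (rules : List (String × List Int)) (ticket : List Int) (out : List Int) : Decidable (Spec_get_invalid_fields rules ticket out) := by unfold Spec_get_invalid_fields; infer_instance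

-- ===== CLAIM (what is proved, stated in full; the proofs are below) =====
def Claim_equal_get_invalid_fields : Prop := ∀ (rules : List (String × List Int)) (ticket : List Int), Dom_get_invalid_fields rules ticket → Spec_get_invalid_fields rules ticket (get_invalid_fields rules ticket)

-- ===== LEMMAS AND PROOFS =====

-- A's inner loop is List.any over the rule values
theorem pvAnyRule_eq_any (field : Int) (rs : List (List Int)) :
    pvAnyRule field rs = rs.any (fun r => r.contains field) := by
  induction rs with
  | nil => rfl
  | cons r rest ih =>
      rw [List.any_cons, ← ih]
      simp only [pvAnyRule]
      split_ifs with h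
      · rw [h, Bool.true_or]
      · rw [Bool.not_eq_true] at h
        rw [h, Bool.false_or]

-- membership in B's merged set = some rule contains the field
theorem contains_fold_union (rules : List (String × List Int)) (s : PySem.Set Int) (f : Int) :
    (rules.foldl (fun s r => PySem.Set.union s r.2) s).contains f
      = (s.contains f || rules.any (fun r => r.2.contains f)) := by
  induction rules generalizing s with
  | nil => simp
  | cons r rest ih =>
      simp only [List.foldl_cons, ih, List.any_cons]
      have : (PySem.Set.union s r.2).contains f = (s.contains f || r.2.contains f) := by
        simp [PySem.Set.contains, PySem.Set.mem_union]
      rw [this, Bool.or_assoc]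

-- A's foldl-with-append is a filter
theorem foldl_append_filter (ticket : List Int) (p : Int → Bool) (acc : List Int) :
    ticket.foldl (fun inv f => if p f then inv else inv ++ [f]) acc
      = acc ++ ticket.filter (fun f => !(p f)) := by
  induction ticket generalizing acc with
  | nil => simp
  | cons t rest ih =>
      simp only [List.foldl_cons, List.filter_cons]
      by_cases h : p t <;> simp [h, ih]

-- ===== VERDICT (by name: the statement is the Claim_ definition above) =====
theorem get_invalid_fields_spec : Claim_equal_get_invalid_fields := by
  intro rules ticket _
  unfold Spec_get_invalid_fields get_invalid_fields get_invalid_fields_alt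
  rw [foldl_append_filter]
  simp only [List.nil_append]
  apply List.filter_congr
  intro f _
  rw [pvAnyRule_eq_any, contains_fold_union]
  simp [List.any_map]
  rfl
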